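-- pv_equiv track=rewrite | github.com/Enjef/Algo | 1400 - 1499/1465 - Maximum Area of a Piece of Cake After Horizontal and Vertical Cuts/1465 - Maximum Area of a Piece of Cake After Horizontal and Vertical Cuts.py | maxArea_v2
-- ===== SOURCE A (Python) =====
-- from typing import List
--
-- def maxArea_v2(h: int, w: int, horizontalCuts: List[int], verticalCuts: List[int]) -> int:
--     horizontalCuts.sort()
--     verticalCuts.sort()
--     h_max = max(horizontalCuts[0], h-horizontalCuts[-1])
--     v_max = max(verticalCuts[0], w-verticalCuts[-1])
--     for i in range(1, len(horizontalCuts)):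
--         h_max = max(h_max, horizontalCuts[i]-horizontalCuts[i-1])
--     for i in range(1, len(verticalCuts)):
--         v_max = max(v_max, verticalCuts[i]-verticalCuts[i-1])
--     return h_max * v_max % (10**9+7)
-- ===== SOURCE B (Python) =====
-- from typing import List
--
-- def maxArea_v2(h: int, w: int, horizontalCuts: List[int], verticalCuts: List[int]) -> int:
--     def widest(total, cuts):
--         # Walk the boundaries top-down: pop the largest remaining cut off a
--         # sorted stack, tracking the widest strip seen, then close with the
--         # bottom edge at 0.
--         stack = sorted(cuts)
--         upper = total
--         best = None
--         while stack:
--             x = stack.pop()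
--             if best is None or upper - x > best:
--                 best = upper - x
--             upper = x
--         if best is None or upper > best:
--             best = upper
--         return best
--
--     return widest(h, horizontalCuts) * widest(w, verticalCuts) % (10 ** 9 + 7)
-- ===== Notes on version B (the rewrite author's own statement) =====
-- stated objective: alternative
-- what changed: B replaces A's edge-gap seeding plus two ascending index-1 loops by a shared helper that walks each axis top-down, popping the largest remaining cut off a sorted stack with a None-seeded running maximum and closing at the 0 edge; B does not mutate its arguments (A sorts them in place).
-- outside the precondition, e.g. on maxArea_v2(5, 4, [], []): A raises IndexError, B returns 20
-- crash fix: On an empty horizontalCuts or verticalCuts A raises IndexError (cuts[0]); B's helper returns the full span, e.g. h*w % (10**9+7) when both are empty. — e.g. on maxArea_v2(5, 4, [], []): A raises IndexError, B returns 20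
import Mathlib
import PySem

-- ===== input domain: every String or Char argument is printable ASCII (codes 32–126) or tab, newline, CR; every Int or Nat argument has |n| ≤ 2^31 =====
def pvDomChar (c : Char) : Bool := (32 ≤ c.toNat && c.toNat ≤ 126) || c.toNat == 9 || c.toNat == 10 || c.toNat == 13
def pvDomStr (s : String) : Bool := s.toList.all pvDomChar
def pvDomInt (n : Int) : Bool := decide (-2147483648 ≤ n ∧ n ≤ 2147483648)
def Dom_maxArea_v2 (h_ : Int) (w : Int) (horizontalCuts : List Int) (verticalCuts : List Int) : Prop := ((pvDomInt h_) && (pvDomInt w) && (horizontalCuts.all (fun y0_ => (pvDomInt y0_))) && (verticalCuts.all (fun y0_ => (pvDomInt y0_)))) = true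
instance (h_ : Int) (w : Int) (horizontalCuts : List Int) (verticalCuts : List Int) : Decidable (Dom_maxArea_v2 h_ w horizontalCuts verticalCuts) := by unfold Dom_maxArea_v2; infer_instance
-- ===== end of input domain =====

-- B replaces A's edge-gap seeding and index-1 loops by a helper that pops the largest
-- remaining cut off a sorted stack top-down with a running maximum (objective: alternative).
-- A sorts its list arguments in place, B does not; the equivalence proved is about the return value.


-- ===== PORT A =====
def maxArea_v2 (h_ : Int) (w : Int) (horizontalCuts : List Int) (verticalCuts : List Int) : Int :=
  let hc := PySem.List.sorted horizontalCuts (fun x => x)      -- horizontalCuts.sort()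
  let vc := PySem.List.sorted verticalCuts (fun x => x)        -- verticalCuts.sort()
  -- h_max = max(horizontalCuts[0], h-horizontalCuts[-1])  (index in range by Pre_)
  let hMax0 := max (PySem.List.pyGetD hc 0 0) (h_ - PySem.List.pyGetD hc (-1) 0)
  let vMax0 := max (PySem.List.pyGetD vc 0 0) (w - PySem.List.pyGetD vc (-1) 0)
  -- for i in range(1, len(...)): ... = max(..., xs[i]-xs[i-1])
  let hMax := (PySem.List.pyRange 1 (hc.length : Int) 1).foldl
    (fun m i => max m (PySem.List.pyGetD hc i 0 - PySem.List.pyGetD hc (i - 1) 0)) hMax0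
  let vMax := (PySem.List.pyRange 1 (vc.length : Int) 1).foldl
    (fun m i => max m (PySem.List.pyGetD vc i 0 - PySem.List.pyGetD vc (i - 1) 0)) vMax0
  PySem.Int.mod (hMax * vMax) (10 ^ 9 + 7)

-- ===== PORT B =====
-- 'while stack: x = stack.pop(); …' pops from the END of the ascending stack, i.e. it
-- walks the REVERSE of sorted(cuts) head-first; ported as structural recursion on that
-- reversed list carrying (upper, best) exactly as the Python loop does (exact).
def pvWidestGo : List Int → Int → Option Int → Int
  | [], upper, best =>
      -- if best is None or upper > best: best = upper; return best
      match best with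
      | none => upper
      | some b => if upper > b then upper else b
  | x :: rest, upper, best =>
      -- if best is None or upper - x > best: best = upper - x
      let best' : Int :=
        match best with
        | none => upper - x
        | some b => if upper - x > b then upper - x else b
      pvWidestGo rest x (some best')

def pvWidest (total : Int) (cuts : List Int) : Int :=
  pvWidestGo (PySem.List.sorted cuts (fun x => x)).reverse total none

def maxArea_v2_alt (h_ : Int) (w : Int) (horizontalCuts : List Int) (verticalCuts : List Int) : Int :=
  PySem.Int.mod (pvWidest h_ horizontalCuts * pvWidest w verticalCuts) (10 ^ 9 + 7)

-- ===== PRECONDITION & SPEC =====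
-- Pre_ excludes exactly the inputs where A raises IndexError: an empty cut list (cuts[0]/cuts[-1]).
def Pre_maxArea_v2 (h_ : Int) (w : Int) (horizontalCuts : List Int) (verticalCuts : List Int) : Prop :=
  horizontalCuts ≠ [] ∧ verticalCuts ≠ []
instance (h_ : Int) (w : Int) (horizontalCuts : List Int) (verticalCuts : List Int) : Decidable (Pre_maxArea_v2 h_ w horizontalCuts verticalCuts) := by unfold Pre_maxArea_v2; infer_instance

def pvWitness_maxArea_v2 : Int × Int × List Int × List Int := (5, 4, [1, 3], [2])

-- On an empty cut list A raises IndexError while B's helper returns the full span (h*w for both empty).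
def Raises_maxArea_v2 (h_ : Int) (w : Int) (horizontalCuts : List Int) (verticalCuts : List Int) : Prop :=
  horizontalCuts = [] ∨ verticalCuts = []
instance (h_ : Int) (w : Int) (horizontalCuts : List Int) (verticalCuts : List Int) : Decidable (Raises_maxArea_v2 h_ w horizontalCuts verticalCuts) := by unfold Raises_maxArea_v2; infer_instance
def pvRaiseWitness_maxArea_v2 : Int × Int × List Int × List Int := (5, 4, [], [])
def pvRaiseWitnessOut_maxArea_v2 : Int := 20

def Spec_maxArea_v2 (h_ : Int) (w : Int) (horizontalCuts : List Int) (verticalCuts : List Int) (out : Int) : Prop := out = maxArea_v2_alt h_ w horizontalCuts verticalCuts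
instance (h_ : Int) (w : Int) (horizontalCuts : List Int) (verticalCuts : List Int) (out : Int) : Decidable (Spec_maxArea_v2 h_ w horizontalCuts verticalCuts out) := by unfold Spec_maxArea_v2; infer_instance

-- ===== CLAIM (what is proved, stated in full; the proofs are below) =====
def Claim_equal_maxArea_v2 : Prop := ∀ (h_ : Int) (w : Int) (horizontalCuts : List Int) (verticalCuts : List Int), Dom_maxArea_v2 h_ w horizontalCuts verticalCuts → Pre_maxArea_v2 h_ w horizontalCuts verticalCuts → Spec_maxArea_v2 h_ w horizontalCuts verticalCuts (maxArea_v2 h_ w horizontalCuts verticalCuts)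
def Claim_raises_maxArea_v2 : Prop := (∀ (h_ : Int) (w : Int) (horizontalCuts : List Int) (verticalCuts : List Int), Dom_maxArea_v2 h_ w horizontalCuts verticalCuts → Raises_maxArea_v2 h_ w horizontalCuts verticalCuts → ¬ Pre_maxArea_v2 h_ w horizontalCuts verticalCuts) ∧ (Dom_maxArea_v2 (pvRaiseWitness_maxArea_v2.1) (pvRaiseWitness_maxArea_v2.2.1) (pvRaiseWitness_maxArea_v2.2.2.1) (pvRaiseWitness_maxArea_v2.2.2.2) ∧ Raises_maxArea_v2 (pvRaiseWitness_maxArea_v2.1) (pvRaiseWitness_maxArea_v2.2.1) (pvRaiseWitness_maxArea_v2.2.2.1) (pvRaiseWitness_maxArea_v2.2.2.2) ∧ maxArea_v2_alt (pvRaiseWitness_maxArea_v2.1) (pvRaiseWitness_maxArea_v2.2.1) (pvRaiseWitness_maxArea_v2.2.2.1) (pvRaiseWitness_maxArea_v2.2.2.2) = pvRaiseWitnessOut_maxArea_v2)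

-- ===== LEMMAS AND PROOFS =====

-- the descending gap list B's stack walk produces: upper, r..., then down to 0
def pvD : Int → List Int → List Int
  | u, [] => [u]
  | u, x :: r => (u - x) :: pvD x r

-- head-seeded fold of max (the maximum of a nonempty list)
def pvHfold : List Int → Int
  | [] => 0
  | g :: gs => gs.foldl max g

-- the pairwise-gap list of an ascending boundary list
theorem pvGaps_cons_cons (a b : Int) (t : List Int) :
    (((a :: b :: t).zip (a :: b :: t).tail).map (fun p => p.2 - p.1))
      = (b - a) :: (((b :: t).zip (b :: t).tail).map (fun p => p.2 - p.1)) := by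
  simp [List.zip]

-- gaps of s ++ [c] = gaps of s plus the closing gap c - last s
theorem pvGaps_append_last (x c : Int) (t : List Int) :
    ((((x :: t) ++ [c]).zip ((x :: t) ++ [c]).tail).map (fun p => p.2 - p.1))
      = (((x :: t).zip (x :: t).tail).map (fun p => p.2 - p.1)) ++ [c - (x :: t).getLast (by simp)] := by
  induction t generalizing x with
  | nil => simp [List.zip]
  | cons y r ih =>
      have h1 := pvGaps_cons_cons x y (r ++ [c])
      simp only [List.cons_append] at h1 ⊢
      rw [h1]
      have h2 := ih y
      simp only [List.cons_append] at h2
      rw [h2, pvGaps_cons_cons x y r]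
      simp

-- pulling a max-argument out of a foldl max
theorem foldl_max_pull (l : List Int) (a b : Int) :
    l.foldl max (max a b) = max (l.foldl max a) b := by
  induction l generalizing a with
  | nil => rfl
  | cons g t ih =>
      simp only [List.foldl_cons]
      rw [max_right_comm a b g, ih]

-- a foldl of max is invariant under reversing the list
theorem foldl_max_reverse (l : List Int) (a : Int) :
    l.reverse.foldl max a = l.foldl max a := by
  induction l generalizing a with
  | nil => rfl
  | cons x t ih =>
      simp only [List.reverse_cons, List.foldl_append, List.foldl_cons, List.foldl_nil, ih]
      rw [foldl_max_pull]

-- the seed can be swapped to the front of the list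
theorem foldl_max_cons_seed (h a : Int) (t : List Int) :
    (h :: t).foldl max a = max (t.foldl max h) a := by
  simp only [List.foldl_cons]
  rw [max_comm a h, foldl_max_pull]

-- the seed is below the fold
theorem le_foldl_max (a : Int) (l : List Int) : a ≤ l.foldl max a := by
  induction l generalizing a with
  | nil => exact le_refl a
  | cons x t ih => exact le_trans (le_max_left a x) (ih (max a x))

-- every member is below a fold of max, whatever the seed
theorem mem_le_foldl_max {a : Int} {l : List Int} (ha : a ∈ l) (b : Int) :
    a ≤ l.foldl max b := by
  induction l generalizing b with
  | nil => cases ha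
  | cons y r ih =>
      simp only [List.foldl_cons]
      rcases List.mem_cons.mp ha with rfl | hmem
      · exact le_trans (le_max_right b a) (le_foldl_max _ r)
      · exact ih hmem _

-- every member is below the head-seeded fold
theorem mem_le_pvHfold {a : Int} {l : List Int} (ha : a ∈ l) : a ≤ pvHfold l := by
  cases l with
  | nil => cases ha
  | cons h t =>
      unfold pvHfold
      rcases List.mem_cons.mp ha with rfl | hmem
      · exact le_foldl_max a t
      · exact mem_le_foldl_max hmem h

-- pvHfold is invariant under reversal (for nonempty lists)
theorem pvHfold_reverse (g : Int) (gs : List Int) :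
    pvHfold ((g :: gs).reverse) = pvHfold (g :: gs) := by
  rcases hrev : (g :: gs).reverse with _ | ⟨g', gs'⟩
  · exact absurd (congrArg List.length hrev) (by simp)
  · have hg' : g' ∈ g :: gs := by
      have : g' ∈ (g :: gs).reverse := by rw [hrev]; exact List.mem_cons_self
      exact List.mem_reverse.mp this
    have h1 : pvHfold (g' :: gs') = (g' :: gs').foldl max g' := by
      unfold pvHfold
      simp only [List.foldl_cons, max_self]
    rw [h1, ← hrev, foldl_max_reverse, foldl_max_cons_seed]
    exact max_eq_left (mem_le_pvHfold hg')

-- reducing pvHfold on a cons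
theorem pvHfold_cons (g : Int) (gs : List Int) : pvHfold (g :: gs) = gs.foldl max g := rfl

-- B's stack loop with a seeded best is a fold of max over the descending gap list
theorem pvWidestGo_some (r : List Int) (u b : Int) :
    pvWidestGo r u (some b) = (pvD u r).foldl max b := by
  induction r generalizing u b with
  | nil =>
      unfold pvWidestGo pvD
      simp only [List.foldl_cons, List.foldl_nil, max_def]
      split_ifs <;> omega
  | cons x rest ih =>
      unfold pvWidestGo pvD
      simp only [List.foldl_cons]
      rw [ih]
      congr 1
      simp only [max_def]
      split_ifs <;> omega

-- B's stack loop from None is the head-seeded fold over the descending gap list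
theorem pvWidestGo_none (r : List Int) (u : Int) :
    pvWidestGo r u none = pvHfold (pvD u r) := by
  cases r with
  | nil => rfl
  | cons x rest =>
      unfold pvWidestGo pvD pvHfold
      exact pvWidestGo_some rest x (u - x)

-- the descending gap list is the reverse of the ascending padded gap list
-- the last element of a :: (l ++ [x]) is x
theorem pv_getLast_snoc (a x : Int) (l : List Int) (h : a :: (l ++ [x]) ≠ []) :
    (a :: (l ++ [x])).getLast h = x := by
  induction l generalizing a with
  | nil => rfl
  | cons b t ih => simp [List.getLast]

theorem pvD_eq_reverse_gaps (u : Int) (r : List Int) :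
    pvD u r = (((0 :: r.reverse ++ [u]).zip (0 :: r.reverse ++ [u]).tail).map
      (fun p => p.2 - p.1)).reverse := by
  induction r generalizing u with
  | nil => simp [pvD, List.zip]
  | cons x rest ih =>
      have h1 : (0 : Int) :: (x :: rest).reverse ++ [u]
          = ((0 : Int) :: (rest.reverse ++ [x])) ++ [u] := by simp
      rw [h1, pvGaps_append_last 0 u (rest.reverse ++ [x])]
      rw [pv_getLast_snoc 0 x rest.reverse, List.reverse_append]
      simp only [List.reverse_cons, List.reverse_nil, List.nil_append, List.singleton_append]
      show (u - x) :: pvD x rest = _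
      rw [ih x]
      simp

-- one axis: A's seeded loop value equals B's top-down stack walk, for any nonempty list
theorem foldA_nat (x : Int) (t : List Int) (init : Int) :
    (List.range t.length).foldl
      (fun (m : Int) (k : Nat) => max m (PySem.List.pyGetD (x :: t) (1 + (k : Int)) 0
        - PySem.List.pyGetD (x :: t) (1 + (k : Int) - 1) 0)) init
    = (((x :: t).zip (x :: t).tail).map (fun p => p.2 - p.1)).foldl max init := by
  induction t generalizing x init with
  | nil => simp [List.zip]
  | cons y r ih =>
      simp only [List.length_cons]
      rw [List.range_succ_eq_map, List.foldl_cons, List.foldl_map]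
      have hfirst : (PySem.List.pyGetD (x :: y :: r) (1 + ((0 : Nat) : Int)) 0
          - PySem.List.pyGetD (x :: y :: r) (1 + ((0 : Nat) : Int) - 1) 0) = y - x := by
        have e0 : (1 + ((0 : Nat) : Int)) = ((1 : Nat) : Int) := by norm_num
        have e0' : (1 + ((0 : Nat) : Int) - 1) = ((0 : Nat) : Int) := by norm_num
        rw [e0', e0]
        simp only [PySem.List.pyGetD_natCast, List.getD_cons_succ, List.getD_cons_zero]
      rw [hfirst, pvGaps_cons_cons, List.foldl_cons]
      have hstep : ∀ (m : Int) (k : Nat),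
          max m (PySem.List.pyGetD (x :: y :: r) (1 + ((k.succ : Nat) : Int)) 0
            - PySem.List.pyGetD (x :: y :: r) (1 + ((k.succ : Nat) : Int) - 1) 0)
          = max m (PySem.List.pyGetD (y :: r) (1 + (k : Int)) 0
            - PySem.List.pyGetD (y :: r) (1 + (k : Int) - 1) 0) := by
        intro m k
        have e1 : (1 + ((k.succ : Nat) : Int)) = (((k + 2 : Nat)) : Int) := by push_cast; ring
        have e2 : (1 + ((k : Nat) : Int)) = (((k + 1 : Nat)) : Int) := by push_cast; ring
        rw [e1, e2]
        have e5 : ((k + 2 : Nat) : Int) - 1 = ((k + 1 : Nat) : Int) := by push_cast; ring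
        have e6 : ((k + 1 : Nat) : Int) - 1 = ((k : Nat) : Int) := by push_cast; ring
        rw [e5, e6]
        simp only [PySem.List.pyGetD_natCast, List.getD_cons_succ]
      simp only [hstep]
      exact ih y (max init (y - x))

-- A's index loop over range(1, len s) equals a fold of max over the gap list of s
theorem foldA_eq_fold_gaps (x : Int) (t : List Int) (init : Int) :
    (PySem.List.pyRange 1 ((x :: t).length : Int) 1).foldl
      (fun m i => max m (PySem.List.pyGetD (x :: t) i 0 - PySem.List.pyGetD (x :: t) (i - 1) 0)) init
    = (((x :: t).zip (x :: t).tail).map (fun p => p.2 - p.1)).foldl max init := by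
  rw [PySem.List.pyRange_one, List.foldl_map]
  have hlen : (((x :: t).length : Int) - 1).toNat = t.length := by simp
  rw [hlen]
  exact foldA_nat x t init

-- one axis: A's seeded loop value equals B's top-down stack walk over the reversed list
theorem axis_eq (c : Int) (x : Int) (t : List Int) :
    (PySem.List.pyRange 1 ((x :: t).length : Int) 1).foldl
      (fun m i => max m (PySem.List.pyGetD (x :: t) i 0 - PySem.List.pyGetD (x :: t) (i - 1) 0))
      (max (PySem.List.pyGetD (x :: t) 0 0) (c - PySem.List.pyGetD (x :: t) (-1) 0))
    = pvWidestGo (x :: t).reverse c none := by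
  rw [foldA_eq_fold_gaps]
  have hne : (x :: t) ≠ [] := by simp
  rw [PySem.List.pyGetD_zero_cons, PySem.List.pyGetD_neg_one (x :: t) 0 hne]
  -- B side: stack walk = head fold over reverse of the ascending padded gap list
  rw [pvWidestGo_none, pvD_eq_reverse_gaps]
  have hrr : ((x :: t).reverse).reverse = x :: t := List.reverse_reverse _
  rw [hrr]
  -- compute the padded gap list: x :: gaps(x::t) ++ [c - last]
  have hpad : ((0 : Int) :: (x :: t) ++ [c]) = (0 : Int) :: ((x :: t) ++ [c]) := by simp
  have hz : ((((0 : Int) :: (x :: t) ++ [c]).zip ((0 : Int) :: (x :: t) ++ [c]).tail).map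
      (fun p => p.2 - p.1))
      = (x - 0) :: ((((x :: t) ++ [c]).zip ((x :: t) ++ [c]).tail).map (fun p => p.2 - p.1)) := by
    simp only [List.cons_append] at *
    exact pvGaps_cons_cons 0 x (t ++ [c])
  rw [hz, pvGaps_append_last]
  rw [show (x - 0 : Int) = x from by ring]
  rw [pvHfold_reverse, pvHfold_cons, List.foldl_append]
  simp only [List.foldl_cons, List.foldl_nil]
  rw [foldl_max_pull]

-- ===== VERDICT (by name: the statement is the Claim_ definition above) =====
theorem maxArea_v2_spec : Claim_equal_maxArea_v2 := by
  intro h_ w hcuts vcuts _ hpre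
  obtain ⟨hh, hv⟩ := hpre
  unfold Spec_maxArea_v2 maxArea_v2 maxArea_v2_alt pvWidest
  have hhs : PySem.List.sorted hcuts (fun x => x) ≠ [] := by
    intro h0
    have := PySem.List.length_sorted hcuts (fun x => x) false
    rw [h0] at this
    exact hh (List.eq_nil_of_length_eq_zero this.symm)
  have hvs : PySem.List.sorted vcuts (fun x => x) ≠ [] := by
    intro h0
    have := PySem.List.length_sorted vcuts (fun x => x) false
    rw [h0] at this
    exact hv (List.eq_nil_of_length_eq_zero this.symm)
  obtain ⟨xh, th, eh⟩ := List.exists_cons_of_ne_nil hhs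
  obtain ⟨xv, tv, ev⟩ := List.exists_cons_of_ne_nil hvs
  simp only [eh, ev]
  rw [axis_eq h_ xh th, axis_eq w xv tv]

@[simp]
theorem maxArea_v2_raises : Claim_raises_maxArea_v2 := by
  unfold Claim_raises_maxArea_v2
  constructor
  · intro h_ w hcuts vcuts _ hr hpre
    rcases hr with h | h
    · exact hpre.1 h
    · exact hpre.2 h
  · exact ⟨by decide, by decide, by decide⟩
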